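-- pv_equiv track=rewrite | github.com/moguizhizi/MindSpeed-MM | mindspeed_rl/workers/resharding/weight_adaptor.py | global2local_layer
-- ===== SOURCE A (Python) =====
-- def global2local_layer(name, num_layer_list):
--     img_pp_layers, llm_pp_layers = num_layer_list
--
--     if name.startswith('visual') and 'blocks' in name:
--         split_name = name.split('.')
--         for i, name_part in enumerate(split_name):
--             if name_part == 'blocks':
--                 break
--         block_num_idx = i + 1
--         if len(split_name) < block_num_idx + 1 or not split_name[block_num_idx].isdigit():
--             raise ValueError(f'Invalid visual block name: {split_name}')
--
--         global_idx = int(split_name[block_num_idx])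
--         local_index = -1
--
--         cumulative_layers = 0
--         for layers_in_pp_rank in img_pp_layers:
--             if layers_in_pp_rank == 0:
--                 continue
--             if cumulative_layers <= global_idx < cumulative_layers + layers_in_pp_rank:
--                 local_index = global_idx - cumulative_layers
--                 break
--             cumulative_layers += layers_in_pp_rank
--
--         if local_index == -1:
--             raise ValueError(f'Could not map visual block {global_idx} to a local index with distribution {img_pp_layers}')
--
--         split_name[block_num_idx] = str(local_index)
--         name = '.'.join(split_name)
--
--     elif name.startswith('language_model') and 'layers' in name:
--         split_name = name.split('.')
--         for i, name_part in enumerate(split_name):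
--             if name_part == 'layers':
--                 break
--         layer_num_idx = i + 1
--         if len(split_name) < layer_num_idx + 1 or not split_name[layer_num_idx].isdigit():
--             raise ValueError(f'Invalid language model layer name: {split_name}')
--
--         global_idx = int(split_name[layer_num_idx])
--         local_index = -1
--
--         cumulative_layers = 0
--         for pp_rank, layers_in_pp_rank in enumerate(llm_pp_layers):
--             if layers_in_pp_rank == 0:
--                 continue
--             if cumulative_layers <= global_idx < cumulative_layers + layers_in_pp_rank:
--                 local_index = global_idx - cumulative_layers
--                 break
--             cumulative_layers += layers_in_pp_rank
--
--         if local_index == -1: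
--             raise ValueError(f'Could not map language model layer {global_idx} to a local index with distribution {llm_pp_layers}')
--
--         split_name[layer_num_idx] = str(local_index)
--         name = '.'.join(split_name)
--
--     return name
-- ===== SOURCE B (Python) =====
-- # Prefix-sum table + recursive binary search for the local offset, shared for both branches,
-- # replacing A's two duplicated accumulate-and-break scans.
-- def _rightmost(prefix, g, lo, hi):
--     # rightmost index r in [lo, hi] with prefix[r] <= g (prefix is nondecreasing, prefix[lo] <= g)
--     if lo >= hi:
--         return lo
--     mid = (lo + hi + 1) // 2
--     if prefix[mid] <= g:
--         return _rightmost(prefix, g, mid, hi)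
--     return _rightmost(prefix, g, lo, mid - 1)
--
--
-- def global2local_layer(name, num_layer_list):
--     img_pp_layers, llm_pp_layers = num_layer_list
--     if name.startswith('visual') and 'blocks' in name:
--         marker, pp, what = 'blocks', img_pp_layers, 'visual block'
--     elif name.startswith('language_model') and 'layers' in name:
--         marker, pp, what = 'layers', llm_pp_layers, 'language model layer'
--     else:
--         return name
--     parts = name.split('.')
--     idx = parts.index(marker) + 1 if marker in parts else len(parts)
--     if idx >= len(parts) or not parts[idx].isdigit():
--         raise ValueError(f'Invalid {what} name: {parts}')
--     global_idx = int(parts[idx])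
--     prefix = [0]
--     total = 0
--     for cnt in pp:
--         total += cnt
--         prefix.append(total)
--     if global_idx >= total:
--         raise ValueError(f'Could not map {what} {global_idx} to a local index with distribution {pp}')
--     r = _rightmost(prefix, global_idx, 0, len(prefix) - 1)
--     parts[idx] = str(global_idx - prefix[r])
--     return '.'.join(parts)
-- ===== Notes on version B (the rewrite author's own statement) =====
-- stated objective: alternative
-- what changed: A's two duplicated accumulate-and-break scans over the pp-list are replaced by one shared branch body that builds a prefix-sum table once and binary-searches it for the rightmost prefix sum <= the global index.
import Mathlib
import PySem

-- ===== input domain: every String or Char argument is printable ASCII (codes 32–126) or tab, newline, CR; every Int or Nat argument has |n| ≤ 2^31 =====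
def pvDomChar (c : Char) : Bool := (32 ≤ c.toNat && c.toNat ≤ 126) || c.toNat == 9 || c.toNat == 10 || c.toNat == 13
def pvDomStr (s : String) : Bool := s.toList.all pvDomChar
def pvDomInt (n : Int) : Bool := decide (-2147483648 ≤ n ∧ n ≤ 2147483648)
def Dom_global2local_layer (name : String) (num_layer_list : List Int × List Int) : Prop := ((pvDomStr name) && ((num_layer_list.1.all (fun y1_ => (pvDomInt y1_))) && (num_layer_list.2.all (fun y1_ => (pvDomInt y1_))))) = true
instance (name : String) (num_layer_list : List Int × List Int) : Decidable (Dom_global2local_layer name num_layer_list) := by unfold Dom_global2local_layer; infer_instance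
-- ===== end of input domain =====

-- B replaces A's two duplicated accumulate-and-break scans by one shared prefix-sum table plus a
-- recursive binary search for the rightmost prefix sum ≤ the global index (objective: alternative).

-- ===== PORT A =====
-- A's `for i, name_part in enumerate(split_name): if name_part == marker: break`
-- (i keeps its last value when no part matches; split_name is never empty)
def pvEnumBreakA (marker : String) : List String → Nat → Nat
  | [], i => i
  | [_], i => i
  | p :: q :: rest, i => if p == marker then i else pvEnumBreakA marker (q :: rest) (i + 1)

-- A's cumulative scan `for layers_in_pp_rank in pp: …` with the local_index = -1 sentinel
def pvScanA (g : Int) : List Int → Int → Int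
  | [], _ => -1
  | c :: rest, cum =>
    if c = 0 then pvScanA g rest cum
    else if cum ≤ g ∧ g < cum + c then g - cum
    else pvScanA g rest (cum + c)

-- one branch body of A (the visual and the language_model branch are textually identical
-- up to marker/list/error message; where Python raises ValueError the port returns `name`,
-- those inputs are excluded by Pre_)
def pvBranchA (name marker : String) (pp : List Int) : String :=
  let parts := (PySem.Str.split? name ".").getD []
  let idx := pvEnumBreakA marker parts 0 + 1
  match parts[idx]? with
  | none => name  -- Python: raise ValueError (outside Pre_)
  | some p =>
    if PySem.Str.strIsdigit p then
      let g := (PySem.Int.ofStr? p).getD 0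
      let localIndex := pvScanA g pp 0
      if localIndex = -1 then name  -- Python: raise ValueError (outside Pre_)
      else PySem.Str.join "." (parts.set idx (PySem.Int.toStr localIndex))
    else name  -- Python: raise ValueError (outside Pre_)

def global2local_layer (name : String) (num_layer_list : List Int × List Int) : String :=
  if PySem.Str.startswith name "visual" && PySem.Str.isIn "blocks" name then
    pvBranchA name "blocks" num_layer_list.1
  else if PySem.Str.startswith name "language_model" && PySem.Str.isIn "layers" name then
    pvBranchA name "layers" num_layer_list.2
  else name

-- ===== PORT B =====
-- Source B `_rightmost`: rightmost index r in [lo, hi] with prefix[r] <= g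
def pvRightmost (pre : List Int) (g lo hi : Int) : Int :=
  if _h : lo ≥ hi then lo
  else if (PySem.List.pyGet? pre (PySem.Int.floordiv (lo + hi + 1) 2)).getD 0 ≤ g then
    pvRightmost pre g (PySem.Int.floordiv (lo + hi + 1) 2) hi
  else pvRightmost pre g lo (PySem.Int.floordiv (lo + hi + 1) 2 - 1)
termination_by (hi - lo).toNat
decreasing_by
  all_goals
    have hm := PySem.Int.floordiv_eq_ediv_of_pos (a := lo + hi + 1) (b := 2) (by omega)
    rw [hm]; omega

-- Source B prefix loop: `total = 0; prefix = [0]; for cnt in pp: total += cnt; prefix.append(total)`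
def pvPrefixB (pp : List Int) : Int × List Int :=
  pp.foldl (fun s c => (s.1 + c, s.2 ++ [s.1 + c])) (0, [0])

-- Source B's shared branch body (where Python raises ValueError the port returns `name`)
def pvBranchB (name marker : String) (pp : List Int) : String :=
  let parts := (PySem.Str.split? name ".").getD []
  let idx := match PySem.List.index? parts marker with
             | some i => i + 1
             | none => parts.length
  match parts[idx]? with
  | none => name  -- Python: raise ValueError (outside Pre_)
  | some p =>
    if PySem.Str.strIsdigit p then
      let g := (PySem.Int.ofStr? p).getD 0
      let tp := pvPrefixB pp
      if g ≥ tp.1 then name  -- Python: raise ValueError (outside Pre_)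
      else
        let r := pvRightmost tp.2 g 0 (tp.2.length - 1)
        PySem.Str.join "." (parts.set idx (PySem.Int.toStr (g - (PySem.List.pyGet? tp.2 r).getD 0)))
    else name  -- Python: raise ValueError (outside Pre_)

def global2local_layer_alt (name : String) (num_layer_list : List Int × List Int) : String :=
  if PySem.Str.startswith name "visual" && PySem.Str.isIn "blocks" name then
    pvBranchB name "blocks" num_layer_list.1
  else if PySem.Str.startswith name "language_model" && PySem.Str.isIn "layers" name then
    pvBranchB name "layers" num_layer_list.2
  else name

-- ===== PRECONDITION & SPEC =====
-- Pre_ excludes (a) every input on which A raises ValueError (marker part missing or not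
-- followed by a digit part, or a global index not covered by the distribution), and (b) branch
-- inputs whose relevant pp-list contains a negative count: negative layer counts are outside
-- the natural domain and A's skip/accumulate scan returns accidental values there that B does
-- not reproduce.  Names that enter neither branch are unconstrained.
def pvPreBranch (name marker : String) (pp : List Int) : Bool :=
  match PySem.List.index? ((PySem.Str.split? name ".").getD []) marker with
  | none => false
  | some i =>
    match ((PySem.Str.split? name ".").getD [])[i + 1]? with
    | none => false
    | some p =>
      PySem.Str.strIsdigit p &&
      pp.all (fun c => decide (0 ≤ c)) &&
      decide (0 ≤ (PySem.Int.ofStr? p).getD 0) &&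
      decide ((PySem.Int.ofStr? p).getD 0 < pp.sum)

def Pre_global2local_layer (name : String) (num_layer_list : List Int × List Int) : Prop :=
  (if PySem.Str.startswith name "visual" && PySem.Str.isIn "blocks" name then
    pvPreBranch name "blocks" num_layer_list.1
  else if PySem.Str.startswith name "language_model" && PySem.Str.isIn "layers" name then
    pvPreBranch name "layers" num_layer_list.2
  else true) = true

instance (name : String) (num_layer_list : List Int × List Int) : Decidable (Pre_global2local_layer name num_layer_list) := by
  unfold Pre_global2local_layer; infer_instance

def pvWitness_global2local_layer : String × (List Int × List Int) :=
  ("visual.blocks.3.attn.weight", ([2, 2], []))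

def Spec_global2local_layer (name : String) (num_layer_list : List Int × List Int) (out : String) : Prop := out = global2local_layer_alt name num_layer_list
instance (name : String) (num_layer_list : List Int × List Int) (out : String) : Decidable (Spec_global2local_layer name num_layer_list out) := by unfold Spec_global2local_layer; infer_instance

-- ===== CLAIM (what is proved, stated in full; the proofs are below) =====
def Claim_equal_global2local_layer : Prop := ∀ (name : String) (num_layer_list : List Int × List Int), Dom_global2local_layer name num_layer_list → Pre_global2local_layer name num_layer_list → Spec_global2local_layer name num_layer_list (global2local_layer name num_layer_list)

-- ===== LEMMAS AND PROOFS =====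

-- A's enumerate/break loop lands on the first index whose part equals the marker
theorem pvEnumBreakA_of_index? (marker : String) :
    ∀ (parts : List String) (i k : Nat), PySem.List.index? parts marker = some i →
      pvEnumBreakA marker parts k = k + i := by
  intro parts
  induction parts with
  | nil => intro i k h; simp [PySem.List.index?_eq_idxOf?] at h
  | cons p rest ih =>
    intro i k h
    by_cases hp : p = marker
    · subst hp
      rw [PySem.List.index?_cons_self] at h
      cases h
      cases rest <;> simp [pvEnumBreakA]
    · rw [PySem.List.index?_cons_of_ne rest hp] at h
      cases hrest : PySem.List.index? rest marker with
      | none => rw [hrest] at h; simp at h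
      | some i' =>
        rw [hrest] at h
        simp at h
        cases rest with
        | nil => simp [PySem.List.index?_eq_idxOf?] at hrest
        | cons q rest' =>
          have := ih i' (k + 1) hrest
          simp [pvEnumBreakA, beq_iff_eq, hp, this]
          omega

-- the proof-level prefix-sum list [cum, cum+c₀, cum+c₀+c₁, …]
def pvPrefList (cum : Int) : List Int → List Int
  | [] => [cum]
  | c :: rest => cum :: pvPrefList (cum + c) rest

theorem pvPrefixB_go (pp : List Int) :
    ∀ (t : Int) (l : List Int),
      pp.foldl (fun s c => (s.1 + c, s.2 ++ [s.1 + c])) (t, l ++ [t]) =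
        (t + pp.sum, l ++ pvPrefList t pp) := by
  induction pp with
  | nil => intro t l; simp [pvPrefList]
  | cons c rest ih =>
    intro t l
    simp only [List.foldl_cons, List.sum_cons]
    have := ih (t + c) (l ++ [t])
    simp only [List.append_assoc] at this ⊢
    rw [this]
    simp [pvPrefList]
    ring

theorem pvPrefixB_eq (pp : List Int) :
    pvPrefixB pp = (pp.sum, pvPrefList 0 pp) := by
  have := pvPrefixB_go pp 0 []
  simpa [pvPrefixB] using this

-- A's reference value: the largest prefix sum ≤ g
def pvLastPref (g cum : Int) : List Int → Int
  | [] => cum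
  | c :: rest => if cum + c ≤ g then pvLastPref g (cum + c) rest else cum

theorem pvScanA_eq (g : Int) :
    ∀ (pp : List Int) (cum : Int), (∀ c ∈ pp, 0 ≤ c) → cum ≤ g → g < cum + pp.sum →
      pvScanA g pp cum = g - pvLastPref g cum pp := by
  intro pp
  induction pp with
  | nil => intro cum _ h1 h2; simp at h2; omega
  | cons c rest ih =>
    intro cum hnn h1 h2
    have hc : 0 ≤ c := hnn c (by simp)
    have hrest : ∀ x ∈ rest, 0 ≤ x := fun x hx => hnn x (by simp [hx])
    simp only [List.sum_cons] at h2
    by_cases hc0 : c = 0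
    · subst hc0
      simp only [pvScanA, pvLastPref, add_zero, if_pos h1]
      exact ih cum hrest h1 (by omega)
    · simp only [pvScanA, pvLastPref, if_neg hc0]
      by_cases hin : cum ≤ g ∧ g < cum + c
      · rw [if_pos hin, if_neg (by omega)]
      · rw [if_neg hin, if_pos (by omega)]
        exact ih (cum + c) hrest (by omega) (by omega)

theorem pvLastPref_le (g : Int) :
    ∀ (pp : List Int) (cum : Int), cum ≤ g → pvLastPref g cum pp ≤ g := by
  intro pp
  induction pp with
  | nil => intro cum h; simpa [pvLastPref] using h
  | cons c rest ih =>
    intro cum h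
    simp only [pvLastPref]
    split_ifs with h1
    · exact ih _ h1
    · exact h

theorem pvPrefList_length (cum : Int) (pp : List Int) :
    (pvPrefList cum pp).length = pp.length + 1 := by
  induction pp generalizing cum with
  | nil => simp [pvPrefList]
  | cons c rest ih => simp [pvPrefList, ih]

theorem pvPrefList_head_le :
    ∀ (pp : List Int) (cum : Int), (∀ c ∈ pp, 0 ≤ c) →
      ∀ x ∈ pvPrefList cum pp, cum ≤ x := by
  intro pp
  induction pp with
  | nil => intro cum _ x hx; simp [pvPrefList] at hx; omega
  | cons c rest ih =>
    intro cum hnn x hx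
    have hc : 0 ≤ c := hnn c (by simp)
    simp only [pvPrefList, List.mem_cons] at hx
    rcases hx with rfl | hx
    · omega
    · have := ih (cum + c) (fun y hy => hnn y (by simp [hy])) x hx
      omega

theorem pvPrefList_mono :
    ∀ (pp : List Int) (cum : Int), (∀ c ∈ pp, 0 ≤ c) →
      ∀ (i j : Nat) (hi : i < (pvPrefList cum pp).length) (hj : j < (pvPrefList cum pp).length),
        i ≤ j → (pvPrefList cum pp)[i] ≤ (pvPrefList cum pp)[j] := by
  intro pp
  induction pp with
  | nil =>
    intro cum _ i j hi hj hij
    simp [pvPrefList] at hi hj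
    subst hi; subst hj; simp
  | cons c rest ih =>
    intro cum hnn i j hi hj hij
    have hc : 0 ≤ c := hnn c (by simp)
    have hrest : ∀ x ∈ rest, 0 ≤ x := fun x hx => hnn x (by simp [hx])
    simp only [pvPrefList] at hi hj ⊢
    cases i with
    | zero =>
      cases j with
      | zero => simp
      | succ j' =>
        simp only [List.getElem_cons_zero, List.getElem_cons_succ]
        have hj' : j' < (pvPrefList (cum + c) rest).length := by simpa using hj
        have hmem : (pvPrefList (cum + c) rest)[j'] ∈ pvPrefList (cum + c) rest :=
          List.getElem_mem _
        have := pvPrefList_head_le rest (cum + c) hrest _ hmem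
        omega
    | succ i' =>
      cases j with
      | zero => omega
      | succ j' =>
        simp only [List.getElem_cons_succ]
        exact ih (cum + c) hrest i' j' (by simpa using hi) (by simpa using hj) (by omega)

-- pvLastPref is attained at a prefix index after which every prefix sum exceeds g
theorem pvLastPref_spec (g : Int) :
    ∀ (pp : List Int) (cum : Int), (∀ c ∈ pp, 0 ≤ c) → cum ≤ g →
      ∃ s : Nat, ∃ hs : s < (pvPrefList cum pp).length,
        (pvPrefList cum pp)[s] = pvLastPref g cum pp ∧
        ∀ (j : Nat) (hj : j < (pvPrefList cum pp).length), s < j → g < (pvPrefList cum pp)[j] := by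
  intro pp
  induction pp with
  | nil =>
    intro cum _ h
    exact ⟨0, by simp [pvPrefList], by simp [pvPrefList, pvLastPref], by
      intro j hj hj0; simp [pvPrefList] at hj; omega⟩
  | cons c rest ih =>
    intro cum hnn h
    have hrest : ∀ x ∈ rest, 0 ≤ x := fun x hx => hnn x (by simp [hx])
    have hc : 0 ≤ c := hnn c (by simp)
    simp only [pvPrefList, pvLastPref]
    by_cases h1 : cum + c ≤ g
    · obtain ⟨s', hs', heq, hafter⟩ := ih (cum + c) hrest h1
      refine ⟨s' + 1, by simpa using hs', by simpa [if_pos h1] using heq, ?_⟩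
      intro j hj hjgt
      cases j with
      | zero => omega
      | succ j' =>
        simp only [List.getElem_cons_succ]
        exact hafter j' (by simpa using hj) (by omega)
    · refine ⟨0, by simp, by simp [if_neg h1], ?_⟩
      intro j hj hjgt
      cases j with
      | zero => omega
      | succ j' =>
        simp only [List.getElem_cons_succ]
        have hj' : j' < (pvPrefList (cum + c) rest).length := by simpa using hj
        have hmem : (pvPrefList (cum + c) rest)[j'] ∈ pvPrefList (cum + c) rest :=
          List.getElem_mem _
        have := pvPrefList_head_le rest (cum + c) hrest _ hmem
        omega

theorem pvPyGetD0 (l : List Int) (n : Nat) (h1 : n < l.length) :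
    (PySem.List.pyGet? l (n : Int)).getD 0 = l[n] := by
  rw [PySem.List.pyGet?_natCast, List.getElem?_eq_getElem h1]
  rfl

-- the binary-search invariant: pvRightmost returns the rightmost index whose value is ≤ g
theorem pvRightmost_spec (pre : List Int) (g : Int)
    (hmono : ∀ (i j : Nat) (hi : i < pre.length) (hj : j < pre.length), i ≤ j → pre[i] ≤ pre[j]) :
    ∀ (lo hi : Int), 0 ≤ lo → lo ≤ hi → hi < pre.length →
      (PySem.List.pyGet? pre lo).getD 0 ≤ g →
      (∀ (j : Nat) (hj : j < pre.length), hi < (j : Int) → g < pre[j]) →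
      ∃ (r : Nat) (hr : r < pre.length), pvRightmost pre g lo hi = (r : Int) ∧
        pre[r] ≤ g ∧ ∀ (j : Nat) (hj : j < pre.length), r < j → g < pre[j] := by
  intro lo hi
  induction hn : (hi - lo).toNat using Nat.strong_induction_on generalizing lo hi with
  | _ n IH =>
  intro h0 hlh hhilen hVlo hafter
  rw [pvRightmost]
  by_cases hle : lo ≥ hi
  · have heq : lo = hi := by omega
    subst heq
    rw [dif_pos (by omega)]
    refine ⟨lo.toNat, by omega, by omega, ?_, ?_⟩
    · rw [show lo = ((lo.toNat : Nat) : Int) by omega, pvPyGetD0 pre lo.toNat (by omega)] at hVlo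
      exact hVlo
    · intro j hj hjgt; exact hafter j hj (by omega)
  · rw [dif_neg hle]
    have hm := PySem.Int.floordiv_eq_ediv_of_pos (a := lo + hi + 1) (b := 2) (by omega)
    set mid := PySem.Int.floordiv (lo + hi + 1) 2 with hmid
    have hmid1 : lo < mid := by omega
    have hmid2 : mid ≤ hi := by omega
    by_cases hV : (PySem.List.pyGet? pre mid).getD 0 ≤ g
    · rw [if_pos hV]
      exact IH (hi - mid).toNat (by omega) mid hi rfl (by omega) (by omega) hhilen hV hafter
    · rw [if_neg hV]
      rw [not_le] at hV
      rw [show mid = ((mid.toNat : Nat) : Int) by omega, pvPyGetD0 pre mid.toNat (by omega)] at hV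
      refine IH (mid - 1 - lo).toNat (by omega) lo (mid - 1) rfl h0 (by omega) (by omega) hVlo ?_
      intro j hj hjgt
      by_cases hjhi : hi < (j : Int)
      · exact hafter j hj hjhi
      · have hmj : mid.toNat ≤ j := by omega
        have := hmono mid.toNat j (by omega) hj hmj
        omega

theorem pvPrefList_zero (cum : Int) (pp : List Int) :
    (pvPrefList cum pp)[0]'(by rw [pvPrefList_length]; omega) = cum := by
  cases pp <;> rfl

-- under the precondition the two branch bodies agree
theorem pvBranch_eq (name marker : String) (pp : List Int)
    (h : pvPreBranch name marker pp = true) :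
    pvBranchA name marker pp = pvBranchB name marker pp := by
  unfold pvPreBranch at h
  set parts := (PySem.Str.split? name ".").getD [] with hparts
  cases hidx : PySem.List.index? parts marker with
  | none => rw [hidx] at h; simp at h
  | some i =>
  rw [hidx] at h
  dsimp only at h
  cases hp : parts[i + 1]? with
  | none => rw [hp] at h; simp at h
  | some p =>
  rw [hp] at h
  dsimp only at h
  clear_value parts
  simp only [Bool.and_eq_true, decide_eq_true_eq] at h
  obtain ⟨⟨⟨hdig, hnnB⟩, hg0⟩, hgsum⟩ := h
  have hnn : ∀ c ∈ pp, 0 ≤ c := by simpa using hnnB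
  set g := (PySem.Int.ofStr? p).getD 0 with hg
  have henum : pvEnumBreakA marker parts 0 = i := by
    simpa using pvEnumBreakA_of_index? marker parts i 0 hidx
  -- the common local index value
  have hlastle : pvLastPref g 0 pp ≤ g := pvLastPref_le g pp 0 hg0
  have hscan : pvScanA g pp 0 = g - pvLastPref g 0 pp :=
    pvScanA_eq g pp 0 hnn hg0 (by omega)
  -- binary-search analysis of B
  set pre := pvPrefList 0 pp with hpre
  have hlen : pre.length = pp.length + 1 := pvPrefList_length 0 pp
  have hmono := pvPrefList_mono pp 0 hnn
  have hpre0 : pre[0]'(by omega) = 0 := pvPrefList_zero 0 pp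
  have hV0 : (PySem.List.pyGet? pre ((0 : Nat) : Int)).getD 0 ≤ g := by
    rw [pvPyGetD0 pre 0 (by omega)]
    simp only [hpre0]
    exact hg0
  obtain ⟨r, hr, hre, hrle, hrafter⟩ :=
    pvRightmost_spec pre g hmono 0 ((pre.length : Int) - 1) (by omega) (by omega) (by omega)
      (by simpa using hV0) (by intro j hj hjgt; omega)
  obtain ⟨s, hs, hseq, hsafter⟩ := pvLastPref_spec g pp 0 hnn hg0
  simp only [← hpre] at hs hseq hsafter
  have hrs : pre[r] = pvLastPref g 0 pp := by
    rcases lt_trichotomy r s with hlt | heq | hgt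
    · have := hrafter s hs hlt; omega
    · subst heq; exact hseq
    · have := hsafter r hr hgt; omega
  -- now compute both sides
  simp only [pvBranchA, pvBranchB, ← hparts, henum, hidx, hp, hdig, if_true]
  rw [hscan, if_neg (by omega), pvPrefixB_eq, ← hpre]
  rw [if_neg (by simp only [ge_iff_le, not_le]; exact hgsum)]
  rw [hre, pvPyGetD0 pre r hr, hrs]

-- ===== VERDICT (by name: the statement is the Claim_ definition above) =====
theorem global2local_layer_spec : Claim_equal_global2local_layer := by
  intro name nl _ hpre
  unfold Pre_global2local_layer at hpre
  unfold Spec_global2local_layer global2local_layer global2local_layer_alt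
  by_cases h1 : (PySem.Str.startswith name "visual" && PySem.Str.isIn "blocks" name) = true
  · rw [if_pos h1] at hpre ⊢
    rw [if_pos h1]
    exact pvBranch_eq name "blocks" nl.1 hpre
  · rw [if_neg h1] at hpre ⊢
    rw [if_neg h1]
    by_cases h2 : (PySem.Str.startswith name "language_model" && PySem.Str.isIn "layers" name) = true
    · rw [if_pos h2] at hpre ⊢
      rw [if_pos h2]
      exact pvBranch_eq name "layers" nl.2 hpre
    · rw [if_neg h2, if_neg h2]
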